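-- pv_equiv track=rewrite | github.com/pypi-data/pypi-mirror-57 | packages/csepy/csepy-0.0.1.2-py3-none-any.whl/csepy/PublicFunctions/SystemCommands/ForEachCommands/ForEachLogic.py | GetCommandsFromSwapDictionary
-- ===== SOURCE A (Python) =====
-- import itertools
--
-- def GetCommandsFromSwapDictionary(command, swapDictionary):
--     valuesList = list(swapDictionary.values())
--     keysList = list(swapDictionary.keys())
--     allOptions = itertools.product(*valuesList)
--     paramCount = len(keysList)
--     results = []
--     for option in allOptions:
--         newCommand = command
--         for i in range(paramCount):
--             newCommand = newCommand.replace(keysList[i], option[i])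
--         results.append(newCommand)
--     return results
-- ===== SOURCE B (Python) =====
-- def GetCommandsFromSwapDictionary(command, swapDictionary):
--     results = [command]
--     for key, valueList in swapDictionary.items():
--         results = [partial.replace(key, value) for partial in results for value in valueList]
--     return results
-- ===== Notes on version B (the rewrite author's own statement) =====
-- stated objective: simpler
-- what changed: Replaces itertools.product tuple enumeration plus an indexed inner replace loop by incremental expansion: a list of partially substituted commands grown by one fold over the dict items.
import Mathlib
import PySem

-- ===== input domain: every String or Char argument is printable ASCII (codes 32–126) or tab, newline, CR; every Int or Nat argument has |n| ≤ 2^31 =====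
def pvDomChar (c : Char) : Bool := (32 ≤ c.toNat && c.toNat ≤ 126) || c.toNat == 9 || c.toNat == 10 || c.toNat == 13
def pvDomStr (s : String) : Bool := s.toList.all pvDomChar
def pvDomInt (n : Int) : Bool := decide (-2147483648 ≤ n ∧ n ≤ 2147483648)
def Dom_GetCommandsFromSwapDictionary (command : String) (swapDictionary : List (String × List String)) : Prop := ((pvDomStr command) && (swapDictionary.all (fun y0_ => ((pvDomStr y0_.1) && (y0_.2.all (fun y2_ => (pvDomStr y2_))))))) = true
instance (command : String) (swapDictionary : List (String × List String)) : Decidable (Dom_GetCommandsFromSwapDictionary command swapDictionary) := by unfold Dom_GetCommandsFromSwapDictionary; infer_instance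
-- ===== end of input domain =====

-- B replaces itertools.product tuple enumeration by incremental expansion of a list of
-- partially substituted commands; equivalence is proved on all inputs (both programs are total).

-- ===== PORT A =====
-- itertools.product(*valuesList): each option lists one choice per value list, first list varies slowest
def pyProduct (ls : List (List String)) : List (List String) :=
  match ls with
  | [] => [[]]
  | l :: ls => l.flatMap (fun x => (pyProduct ls).map (fun rest => x :: rest))

def GetCommandsFromSwapDictionary (command : String) (swapDictionary : List (String × List String)) : List String :=
  let d := PySem.Dict.ofList swapDictionary
  let valuesList := PySem.Dict.values d
  let keysList := PySem.Dict.keys d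
  let allOptions := pyProduct valuesList
  let paramCount := keysList.length
  -- indices i in range(paramCount) are always in range, so the pyGetD default "" is never used
  allOptions.foldl (fun results option =>
    results ++ [(PySem.List.pyRange 0 (paramCount : Int) 1).foldl
      (fun newCommand i =>
        PySem.Str.replace newCommand (PySem.List.pyGetD keysList i "") (PySem.List.pyGetD option i ""))
      command]) []

-- ===== PORT B =====
def GetCommandsFromSwapDictionary_alt (command : String) (swapDictionary : List (String × List String)) : List String :=
  (PySem.Dict.ofList swapDictionary).items.foldl
    (fun results kv =>
      results.flatMap (fun partial_ => kv.2.map (fun value => PySem.Str.replace partial_ kv.1 value)))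
    [command]

-- ===== PRECONDITION & SPEC =====
def Spec_GetCommandsFromSwapDictionary (command : String) (swapDictionary : List (String × List String)) (out : List String) : Prop := out = GetCommandsFromSwapDictionary_alt command swapDictionary
instance (command : String) (swapDictionary : List (String × List String)) (out : List String) : Decidable (Spec_GetCommandsFromSwapDictionary command swapDictionary out) := by unfold Spec_GetCommandsFromSwapDictionary; infer_instance

-- ===== CLAIM (what is proved, stated in full; the proofs are below) =====
def Claim_equal_GetCommandsFromSwapDictionary : Prop := ∀ (command : String) (swapDictionary : List (String × List String)), Dom_GetCommandsFromSwapDictionary command swapDictionary → Spec_GetCommandsFromSwapDictionary command swapDictionary (GetCommandsFromSwapDictionary command swapDictionary)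

-- ===== LEMMAS AND PROOFS =====

-- every option produced by pyProduct has one entry per value list
lemma pyProduct_length (ls : List (List String)) :
    ∀ o ∈ pyProduct ls, o.length = ls.length := by
  induction ls with
  | nil => simp [pyProduct]
  | cons l ls ih =>
    intro o ho
    simp only [pyProduct, List.mem_flatMap, List.mem_map] at ho
    obtain ⟨x, -, rest, hrest, rfl⟩ := ho
    simp [ih rest hrest]

-- the index-driven inner loop of A is the fold over the zipped key/value pairs
lemma idxFold_eq_zipFold (ks os : List String) (cmd : String) (hlen : os.length = ks.length) :
    (PySem.List.pyRange 0 (ks.length : Int) 1).foldl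
      (fun c i => PySem.Str.replace c (PySem.List.pyGetD ks i "") (PySem.List.pyGetD os i "")) cmd
  = (ks.zip os).foldl (fun c p => PySem.Str.replace c p.1 p.2) cmd := by
  have hz : (ks.zip os).length = ks.length := by simp [hlen]
  have hstep : List.foldl
      (fun c i => PySem.Str.replace c (PySem.List.pyGetD ks i "") (PySem.List.pyGetD os i "")) cmd
      (PySem.List.pyRange 0 (ks.length : Int) 1)
    = List.foldl
      (fun c i => PySem.Str.replace c (PySem.List.pyGetD (ks.zip os) i ("", "")).1
        (PySem.List.pyGetD (ks.zip os) i ("", "")).2) cmd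
      (PySem.List.pyRange 0 (ks.length : Int) 1) := by
    apply PySem.List.foldl_congr_mem
    intro c i hi
    rw [PySem.List.mem_pyRange_one] at hi
    have hik : i.toNat < ks.length := by omega
    have hio : i.toNat < os.length := by omega
    have hizn : i.toNat < (ks.zip os).length := by rw [hz]; omega
    rw [PySem.List.pyGetD_eq_getElem ks "" hi.1 (by exact_mod_cast hi.2),
        PySem.List.pyGetD_eq_getElem os "" hi.1 (by rw [hlen]; exact_mod_cast hi.2),
        PySem.List.pyGetD_eq_getElem (ks.zip os) ("", "") hi.1 (by rw [hz]; exact_mod_cast hi.2),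
        List.getElem_zip]
  rw [hstep, ← hz]
  exact PySem.List.foldl_pyRange_zero_pyGetD' (ks.zip os) ("", "")
    (fun c p => PySem.Str.replace c p.1 p.2) cmd

-- B's fold over the remaining items distributes over the current result list
lemma foldl_step_flatMap (rest : List (String × List String)) (xs : List String) :
    rest.foldl (fun results kv =>
        results.flatMap (fun r => kv.2.map (fun v => PySem.Str.replace r kv.1 v))) xs
  = xs.flatMap (fun c => rest.foldl (fun results kv =>
        results.flatMap (fun r => kv.2.map (fun v => PySem.Str.replace r kv.1 v))) [c]) := by
  induction rest generalizing xs with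
  | nil => simp
  | cons kv rest ih =>
    simp only [List.foldl_cons]
    rw [ih, List.flatMap_assoc]
    congr 1
    funext c
    rw [ih]
    simp

-- main bridge: mapping the zip-fold over the product equals B's incremental expansion
lemma main_bridge (items : List (String × List String)) (cmd : String) :
    (pyProduct (items.map Prod.snd)).map
      (fun opt => ((items.map Prod.fst).zip opt).foldl (fun c p => PySem.Str.replace c p.1 p.2) cmd)
  = items.foldl (fun results kv =>
        results.flatMap (fun r => kv.2.map (fun v => PySem.Str.replace r kv.1 v))) [cmd] := by
  induction items generalizing cmd with
  | nil => simp [pyProduct]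
  | cons kv rest ih =>
    obtain ⟨k, vs⟩ := kv
    simp only [List.map_cons, pyProduct, List.map_flatMap, List.map_map, List.foldl_cons]
    rw [foldl_step_flatMap rest ([cmd].flatMap (fun r => vs.map (fun v => PySem.Str.replace r k v)))]
    simp only [List.flatMap_singleton, List.flatMap_map]
    congr 1
    funext v
    simpa using ih (PySem.Str.replace cmd k v)

-- ===== VERDICT (by name: the statement is the Claim_ definition above) =====
theorem GetCommandsFromSwapDictionary_spec : Claim_equal_GetCommandsFromSwapDictionary := by
  intro command swapDictionary _
  unfold Spec_GetCommandsFromSwapDictionary GetCommandsFromSwapDictionary GetCommandsFromSwapDictionary_alt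
  simp only []
  rw [PySem.List.foldl_append_singleton_eq_map, List.nil_append]
  rw [List.map_congr_left (fun o ho =>
    idxFold_eq_zipFold (PySem.Dict.keys (PySem.Dict.ofList swapDictionary)) o command
      (by rw [pyProduct_length _ o ho]; simp [PySem.Dict.values, PySem.Dict.keys]))]
  exact main_bridge (PySem.Dict.ofList swapDictionary).items command
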